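-- pv_equiv track=rewrite | github.com/rishabhshah1309/NLP_Sentiment_Analyzer | selenium_scraper.py | _is_sports_content_lenient
-- ===== SOURCE A (Python) =====
-- def _is_sports_content_lenient(text):
--     """Very lenient sports content detection"""
--     if not text:
--         return False
--
--     text_lower = text.lower()
--
--     # Any sports-related term
--     sports_terms = [
--         'team', 'teams', 'player', 'players', 'coach', 'game', 'season',
--         'league', 'championship', 'tournament', 'match', 'sport', 'sports',
--         'nfl', 'nba', 'mlb', 'nhl', 'mls', 'soccer', 'football', 'basketball',
--         'baseball', 'hockey', 'tennis', 'golf', 'olympics', 'college',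
--         'quarterback', 'touchdown', 'goal', 'points', 'score', 'win', 'loss'
--     ]
--
--     return any(term in text_lower for term in sports_terms)
-- ===== SOURCE B (Python) =====
-- _SPORTS_TERMS = (
--     'team', 'teams', 'player', 'players', 'coach', 'game', 'season',
--     'league', 'championship', 'tournament', 'match', 'sport', 'sports',
--     'nfl', 'nba', 'mlb', 'nhl', 'mls', 'soccer', 'football', 'basketball',
--     'baseball', 'hockey', 'tennis', 'golf', 'olympics', 'college',
--     'quarterback', 'touchdown', 'goal', 'points', 'score', 'win', 'loss'
-- )
--
--
-- def _is_sports_content_lenient(text):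
--     """Very lenient sports content detection: single left-to-right scan,
--     at each position test whether any sports term starts there."""
--     if not text:
--         return False
--     text_lower = text.lower()
--     return any(text_lower.startswith(_SPORTS_TERMS, i)
--                for i in range(len(text_lower)))
-- ===== Notes on version B (the rewrite author's own statement) =====
-- stated objective: alternative
-- what changed: A scans the whole lowered text once per keyword with a per-term substring test; B makes a single left-to-right pass over the text positions and at each position tests whether any of the keywords starts there (startswith with the keyword tuple).
import Mathlib
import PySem

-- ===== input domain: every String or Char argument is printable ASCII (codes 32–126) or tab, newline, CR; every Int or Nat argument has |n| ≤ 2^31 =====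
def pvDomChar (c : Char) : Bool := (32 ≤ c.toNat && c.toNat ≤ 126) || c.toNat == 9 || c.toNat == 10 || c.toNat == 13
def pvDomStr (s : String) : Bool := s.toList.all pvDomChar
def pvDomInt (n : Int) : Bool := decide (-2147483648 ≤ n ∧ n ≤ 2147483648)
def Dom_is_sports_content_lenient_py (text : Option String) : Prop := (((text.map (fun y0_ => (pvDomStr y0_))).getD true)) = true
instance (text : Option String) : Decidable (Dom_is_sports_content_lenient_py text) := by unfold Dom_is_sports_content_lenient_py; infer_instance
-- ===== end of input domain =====

-- B replaces A's per-term substring scans with a single left-to-right scan over text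
-- positions, testing at each position whether any sports term starts there (objective: alternative).


-- ===== PORT A =====
def pvSportsTermsA : List String :=
  ["team", "teams", "player", "players", "coach", "game", "season",
   "league", "championship", "tournament", "match", "sport", "sports",
   "nfl", "nba", "mlb", "nhl", "mls", "soccer", "football", "basketball",
   "baseball", "hockey", "tennis", "golf", "olympics", "college",
   "quarterback", "touchdown", "goal", "points", "score", "win", "loss"]

def is_sports_content_lenient_py (text : Option String) : Bool :=
  match text with
  | none => false
  | some s =>
    if PySem.Str.len s = 0 then false
    else
      let text_lower := PySem.Str.lower s
      pvSportsTermsA.any (fun term => PySem.Str.isIn term text_lower)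

-- ===== PORT B =====
def pvSportsTermsB : List (List Char) :=
  ["team".toList, "teams".toList, "player".toList, "players".toList, "coach".toList,
   "game".toList, "season".toList, "league".toList, "championship".toList,
   "tournament".toList, "match".toList, "sport".toList, "sports".toList,
   "nfl".toList, "nba".toList, "mlb".toList, "nhl".toList, "mls".toList,
   "soccer".toList, "football".toList, "basketball".toList, "baseball".toList,
   "hockey".toList, "tennis".toList, "golf".toList, "olympics".toList,
   "college".toList, "quarterback".toList, "touchdown".toList, "goal".toList,
   "points".toList, "score".toList, "win".toList, "loss".toList]

-- the scan: for each position (suffix) of the text, does some term start there?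
def pvScan (terms : List (List Char)) : List Char → Bool
  | [] => false
  | c :: rest =>
    if terms.any (fun t => PySem.Chars.startswith (c :: rest) t) then true
    else pvScan terms rest

def is_sports_content_lenient_py_alt (text : Option String) : Bool :=
  match text with
  | none => false
  | some s =>
    if PySem.Str.len s = 0 then false
    else pvScan pvSportsTermsB (PySem.Str.lower s).toList

-- ===== PRECONDITION & SPEC =====
def Spec_is_sports_content_lenient_py (text : Option String) (out : Bool) : Prop := out = is_sports_content_lenient_py_alt text
instance (text : Option String) (out : Bool) : Decidable (Spec_is_sports_content_lenient_py text out) := by unfold Spec_is_sports_content_lenient_py; infer_instance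

-- ===== CLAIM (what is proved, stated in full; the proofs are below) =====
def Claim_equal_is_sports_content_lenient_py : Prop := ∀ (text : Option String), Dom_is_sports_content_lenient_py text → Spec_is_sports_content_lenient_py text (is_sports_content_lenient_py text)

-- ===== LEMMAS AND PROOFS =====

-- the scan finds a term iff some term is an infix of the text (terms all nonempty)
theorem pvScan_eq_any_isIn (terms : List (List Char)) (h : ∀ t ∈ terms, t ≠ []) :
    ∀ s : List Char, pvScan terms s = terms.any (fun t => PySem.Chars.isIn t s) := by
  intro s
  induction s with
  | nil =>
    simp only [pvScan]
    symm
    simp only [List.any_eq_false]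
    intro t ht
    rw [Bool.not_eq_true, PySem.Chars.isIn_eq_false_iff, List.infix_nil]
    exact h t ht
  | cons c rest ih =>
    simp only [pvScan]
    rw [Bool.eq_iff_iff]
    constructor
    · intro hsc
      split at hsc
      · rename_i hany
        simp only [List.any_eq_true] at hany ⊢
        obtain ⟨t, ht, hp⟩ := hany
        refine ⟨t, ht, ?_⟩
        rw [PySem.Chars.isIn_iff_infix]
        exact ((PySem.Chars.startswith_iff _ _).1 hp).isInfix
      · rw [ih] at hsc
        simp only [List.any_eq_true] at hsc ⊢
        obtain ⟨t, ht, hin⟩ := hsc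
        refine ⟨t, ht, ?_⟩
        rw [PySem.Chars.isIn_iff_infix] at hin ⊢
        exact hin.trans (List.suffix_cons c rest).isInfix
    · intro hany
      simp only [List.any_eq_true] at hany
      obtain ⟨t, ht, hin⟩ := hany
      rw [PySem.Chars.isIn_iff_infix, List.infix_cons_iff] at hin
      rcases hin with hpre | hinf
      · have : terms.any (fun t => PySem.Chars.startswith (c :: rest) t) = true := by
          simp only [List.any_eq_true]
          exact ⟨t, ht, (PySem.Chars.startswith_iff _ _).2 hpre⟩
        simp [this]
      · split
        · rfl
        · rw [ih]
          simp only [List.any_eq_true]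
          exact ⟨t, ht, (PySem.Chars.isIn_iff_infix _ _).2 hinf⟩

theorem pvTerms_eq : pvSportsTermsB = pvSportsTermsA.map String.toList := by decide

-- ===== VERDICT (by name: the statement is the Claim_ definition above) =====
theorem is_sports_content_lenient_py_spec : Claim_equal_is_sports_content_lenient_py := by
  intro text _
  unfold Spec_is_sports_content_lenient_py
  match text with
  | none => rfl
  | some s =>
    simp only [is_sports_content_lenient_py, is_sports_content_lenient_py_alt]
    split
    · rfl
    · rw [pvScan_eq_any_isIn pvSportsTermsB (by decide), pvTerms_eq, List.any_map]
      simp [Function.comp_def]
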